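-- pv_equiv track=rewrite | github.com/moltencrux/wordlesmash | wordlesmash/wordle_tree.py | depth_cmp
-- ===== SOURCE A (Python) =====
-- from collections import namedtuple, Counter, defaultdict
--
-- def depth_cmp(r1, r2):
--     # A None in the routes will be regarded as an aborted route
--
--     if r2 is None or None in r2:
--         if r1 is None or None in r1:
--             return 0
--         else:
--             return -1
--     elif r1 is None or None in r1:
--         return 1
--
--     r1_cts = Counter(len(path) for path in r1)
--     r2_cts = Counter(len(path) for path in r2)
--
--     return depth_counts_cmp(r1_cts, r2_cts)
--
-- def depth_counts_cmp(r1_cts, r2_cts):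
--
--     for key in sorted(r1_cts.keys() | r2_cts.keys(), reverse=True):
--         if r1_cts.get(key, 0) > r2_cts.get(key, 0):
--             return 1
--         elif r1_cts.get(key, 0) < r2_cts.get(key, 0):
--             return -1
--     return 0
-- ===== SOURCE B (Python) =====
-- def depth_cmp(r1, r2):
--     # A None in the routes will be regarded as an aborted route
--     if r2 is None or None in r2:
--         return 0 if (r1 is None or None in r1) else -1
--     if r1 is None or None in r1:
--         return 1
--     la = sorted((len(p) for p in r1), reverse=True)
--     lb = sorted((len(p) for p in r2), reverse=True)
--     for x, y in zip(la, lb):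
--         if x != y:
--             return 1 if x > y else -1
--     return (len(la) > len(lb)) - (len(la) < len(lb))
-- ===== Notes on version B (the rewrite author's own statement) =====
-- stated objective: idiomatic
-- what changed: Replaces A's per-depth Counter tables, key-set union and descending scan over keys with a direct lexicographic comparison of the two depth sequences sorted in descending order (zip scan plus length tie-break); no frequency table is built.
import Mathlib
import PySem

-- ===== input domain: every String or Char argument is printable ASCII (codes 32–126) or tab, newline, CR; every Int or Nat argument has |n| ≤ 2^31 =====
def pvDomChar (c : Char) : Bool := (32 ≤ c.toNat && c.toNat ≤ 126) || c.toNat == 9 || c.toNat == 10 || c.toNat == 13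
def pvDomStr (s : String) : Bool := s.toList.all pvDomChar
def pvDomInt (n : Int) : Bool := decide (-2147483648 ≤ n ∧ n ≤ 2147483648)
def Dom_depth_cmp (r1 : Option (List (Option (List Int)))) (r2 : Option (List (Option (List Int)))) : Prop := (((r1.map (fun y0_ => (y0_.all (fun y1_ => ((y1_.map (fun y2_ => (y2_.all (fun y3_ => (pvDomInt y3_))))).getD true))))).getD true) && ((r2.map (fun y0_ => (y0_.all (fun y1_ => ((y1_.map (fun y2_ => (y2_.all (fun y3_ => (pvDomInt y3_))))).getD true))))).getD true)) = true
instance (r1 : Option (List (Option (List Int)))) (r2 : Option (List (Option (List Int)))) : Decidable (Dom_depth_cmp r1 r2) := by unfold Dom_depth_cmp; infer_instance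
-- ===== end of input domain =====

-- B replaces A's per-depth Counter table (plus key-set union and descending key scan) by the two
-- descending-sorted depth sequences compared lexicographically: idiomatic, no frequency table.

-- ===== PORT A =====
-- 'r is None or None in r' (an aborted route set)
def depthAbortedA (r : Option (List (Option (List Int)))) : Bool :=
  match r with
  | none => true
  | some l => l.contains none

-- the 'for key in sorted(..., reverse=True)' loop of depth_counts_cmp, with its early returns
def depthCmpLoopA (c1 c2 : PySem.Dict Int Int) : List Int → Int
  | [] => 0
  | k :: ks =>
      if c1.getD k 0 > c2.getD k 0 then 1
      else if c1.getD k 0 < c2.getD k 0 then -1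
      else depthCmpLoopA c1 c2 ks

def depth_counts_cmp (r1_cts r2_cts : PySem.Dict Int Int) : Int :=
  depthCmpLoopA r1_cts r2_cts
    (PySem.List.sorted (PySem.Set.union r1_cts.keys r2_cts.keys) (fun x => x) true)

def depth_cmp (r1 : Option (List (Option (List Int)))) (r2 : Option (List (Option (List Int)))) : Int :=
  if depthAbortedA r2 then
    (if depthAbortedA r1 then 0 else -1)
  else if depthAbortedA r1 then 1
  else
    -- len(path): after the guard no path is None, so getD [] is never the defaulted branch
    let r1_cts := PySem.Dict.counter ((r1.getD []).map (fun p => ((p.getD []).length : Int)))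
    let r2_cts := PySem.Dict.counter ((r2.getD []).map (fun p => ((p.getD []).length : Int)))
    depth_counts_cmp r1_cts r2_cts

-- ===== PORT B =====
def depthAbortedB (r : Option (List (Option (List Int)))) : Bool :=
  match r with
  | none => true
  | some l => l.contains none

-- 'for x, y in zip(la, lb): …' then the final length comparison on the remainders
-- (zip has consumed the same number of elements from both lists, so the sign is unchanged)
def depthCmpLoopB : List Int → List Int → Int
  | x :: s, y :: t => if x ≠ y then (if x > y then 1 else -1) else depthCmpLoopB s t
  | la, lb =>
      (if la.length > lb.length then 1 else 0) - (if la.length < lb.length then 1 else 0)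

def depth_cmp_alt (r1 : Option (List (Option (List Int)))) (r2 : Option (List (Option (List Int)))) : Int :=
  if depthAbortedB r2 then
    (if depthAbortedB r1 then 0 else -1)
  else if depthAbortedB r1 then 1
  else
    let la := PySem.List.sorted ((r1.getD []).map (fun p => ((p.getD []).length : Int))) (fun x => x) true
    let lb := PySem.List.sorted ((r2.getD []).map (fun p => ((p.getD []).length : Int))) (fun x => x) true
    depthCmpLoopB la lb

-- ===== PRECONDITION & SPEC =====
def Spec_depth_cmp (r1 : Option (List (Option (List Int)))) (r2 : Option (List (Option (List Int)))) (out : Int) : Prop := out = depth_cmp_alt r1 r2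
instance (r1 : Option (List (Option (List Int)))) (r2 : Option (List (Option (List Int)))) (out : Int) : Decidable (Spec_depth_cmp r1 r2 out) := by unfold Spec_depth_cmp; infer_instance

-- ===== CLAIM (what is proved, stated in full; the proofs are below) =====
def Claim_equal_depth_cmp : Prop := ∀ (r1 : Option (List (Option (List Int)))) (r2 : Option (List (Option (List Int)))), Dom_depth_cmp r1 r2 → Spec_depth_cmp r1 r2 (depth_cmp r1 r2)

-- ===== LEMMAS AND PROOFS =====

-- A's loop phrased on raw count values (getD on a counter is List.count)
def firstDiff : List Int → List Int → List Int → Int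
  | [], _, _ => 0
  | k :: ks, l1, l2 =>
      if (l1.count k : Int) > (l2.count k : Int) then 1
      else if (l1.count k : Int) < (l2.count k : Int) then -1
      else firstDiff ks l1 l2

theorem depthCmpLoopA_eq_firstDiff (l1 l2 : List Int) (ks : List Int) :
    depthCmpLoopA (PySem.Dict.counter l1) (PySem.Dict.counter l2) ks = firstDiff ks l1 l2 := by
  induction ks with
  | nil => rfl
  | cons k ks ih => simp [depthCmpLoopA, firstDiff, PySem.Dict.getD_counter, ih]

theorem desc_decomp (k : Int) (s : List Int) (hs : s.Pairwise (· ≥ ·)) (hle : ∀ x ∈ s, x ≤ k) :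
    s = List.replicate (s.count k) k ++ s.filter (fun x => decide (x ≠ k)) := by
  induction s with
  | nil => rfl
  | cons x rest ih =>
    rcases List.pairwise_cons.mp hs with ⟨hx, hrest⟩
    by_cases hxk : x = k
    · subst hxk
      have := ih hrest (fun y hy => hle y (List.mem_cons_of_mem _ hy))
      simpa [List.count_cons, List.replicate_succ] using this
    · have hxlt : x < k := lt_of_le_of_ne (hle x (List.mem_cons_self)) hxk
      have hknot : k ∉ rest := fun hk => absurd (hx k hk) (not_le.mpr hxlt)
      have hc : rest.count k = 0 := List.count_eq_zero.mpr hknot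
      have hf : rest.filter (fun x => decide (x ≠ k)) = rest :=
        List.filter_eq_self.mpr (fun y hy => by
          simp only [decide_eq_true_eq]
          exact fun h => hknot (h ▸ hy))
      have hcnt : (x :: rest).count k = 0 := by simp [hc, hxk]
      rw [hcnt, List.replicate_zero, List.nil_append,
        List.filter_cons_of_pos (by simp [hxk])]
      exact congrArg (List.cons x) hf.symm

theorem depthCmpLoopB_strip (n : Nat) (k : Int) (u v : List Int) :
    depthCmpLoopB (List.replicate n k ++ u) (List.replicate n k ++ v) = depthCmpLoopB u v := by
  induction n with
  | zero => simp
  | succ n ih => simpa [List.replicate_succ, depthCmpLoopB] using ih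

theorem depthCmpLoopB_gt (k : Int) (m : Nat) (u v : List Int) (hm : 0 < m)
    (hv : ∀ y ∈ v, y < k) : depthCmpLoopB (List.replicate m k ++ u) v = 1 := by
  obtain ⟨m', rfl⟩ : ∃ m', m = m' + 1 := ⟨m - 1, by omega⟩
  rw [List.replicate_succ, List.cons_append]
  cases v with
  | nil =>
    show depthCmpLoopB (k :: (List.replicate m' k ++ u)) [] = 1
    simp [depthCmpLoopB]
  | cons y v' =>
    have hyk : y < k := hv y List.mem_cons_self
    simp [depthCmpLoopB, ne_of_gt hyk, hyk]

theorem depthCmpLoopB_lt (k : Int) (m : Nat) (u v : List Int) (hm : 0 < m)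
    (hu : ∀ x ∈ u, x < k) : depthCmpLoopB u (List.replicate m k ++ v) = -1 := by
  obtain ⟨m', rfl⟩ : ∃ m', m = m' + 1 := ⟨m - 1, by omega⟩
  rw [List.replicate_succ, List.cons_append]
  cases u with
  | nil =>
    show depthCmpLoopB [] (k :: (List.replicate m' k ++ v)) = -1
    simp [depthCmpLoopB]
  | cons x u' =>
    have hxk : x < k := hu x List.mem_cons_self
    simp [depthCmpLoopB, ne_of_lt hxk, not_lt.mpr (le_of_lt hxk)]

theorem count_filter_ne (j k : Int) (l : List Int) (h : j ≠ k) :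
    (l.filter (fun x => decide (x ≠ k))).count j = l.count j := by
  rw [List.count_filter]
  simp [h]

theorem firstDiff_filter (k : Int) (ks l1 l2 : List Int) (h : ∀ j ∈ ks, j ≠ k) :
    firstDiff ks (l1.filter (fun x => decide (x ≠ k))) (l2.filter (fun x => decide (x ≠ k)))
      = firstDiff ks l1 l2 := by
  induction ks with
  | nil => rfl
  | cons j ks ih =>
    have hj : j ≠ k := h j List.mem_cons_self
    simp only [firstDiff, count_filter_ne j k l1 hj, count_filter_ne j k l2 hj,
      ih (fun j hj => h j (List.mem_cons_of_mem _ hj))]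

theorem firstDiff_eq_depthCmpLoopB (ks : List Int) : ∀ (l1 l2 s1 s2 : List Int),
    ks.Pairwise (· > ·) →
    (∀ x ∈ l1, x ∈ ks) → (∀ x ∈ l2, x ∈ ks) →
    s1.Perm l1 → s1.Pairwise (· ≥ ·) →
    s2.Perm l2 → s2.Pairwise (· ≥ ·) →
    firstDiff ks l1 l2 = depthCmpLoopB s1 s2 := by
  induction ks with
  | nil =>
    intro l1 l2 s1 s2 _ h1 h2 hp1 _ hp2 _
    have e1 : l1 = [] := List.eq_nil_iff_forall_not_mem.mpr (fun x hx => by simpa using h1 x hx)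
    have e2 : l2 = [] := List.eq_nil_iff_forall_not_mem.mpr (fun x hx => by simpa using h2 x hx)
    subst e1; subst e2
    rw [List.perm_nil.mp hp1, List.perm_nil.mp hp2]
    rfl
  | cons k ks ih =>
    intro l1 l2 s1 s2 hks h1 h2 hp1 hd1 hp2 hd2
    rcases List.pairwise_cons.mp hks with ⟨hkgt, hks'⟩
    -- every element is ≤ k
    have hle : ∀ (l : List Int), (∀ x ∈ l, x ∈ k :: ks) → ∀ x ∈ l, x ≤ k := by
      intro l hl x hx
      rcases List.mem_cons.mp (hl x hx) with rfl | hmem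
      · exact le_refl x
      · exact le_of_lt (hkgt x hmem)
    have hle1 : ∀ x ∈ s1, x ≤ k := fun x hx => hle l1 h1 x (hp1.mem_iff.mp hx)
    have hle2 : ∀ x ∈ s2, x ≤ k := fun x hx => hle l2 h2 x (hp2.mem_iff.mp hx)
    have hdec1 := desc_decomp k s1 hd1 hle1
    have hdec2 := desc_decomp k s2 hd2 hle2
    set t1 := s1.filter (fun x => decide (x ≠ k)) with ht1
    set t2 := s2.filter (fun x => decide (x ≠ k)) with ht2
    have hct1 : s1.count k = l1.count k := hp1.count_eq k
    have hct2 : s2.count k = l2.count k := hp2.count_eq k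
    have htlt1 : ∀ x ∈ t1, x < k := by
      intro x hx
      rw [ht1, List.mem_filter] at hx
      exact lt_of_le_of_ne (hle1 x hx.1) (by simpa using hx.2)
    have htlt2 : ∀ x ∈ t2, x < k := by
      intro x hx
      rw [ht2, List.mem_filter] at hx
      exact lt_of_le_of_ne (hle2 x hx.1) (by simpa using hx.2)
    rcases lt_trichotomy (l1.count k) (l2.count k) with hlt | heq | hgt
    · -- A returns -1 at key k
      have : firstDiff (k :: ks) l1 l2 = -1 := by
        simp only [firstDiff]
        rw [if_neg (by exact_mod_cast not_lt.mpr (le_of_lt hlt)), if_pos (by exact_mod_cast hlt)]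
      rw [this, hdec1, hdec2, hct1, hct2]
      obtain ⟨d, hd⟩ : ∃ d, l2.count k = l1.count k + d := ⟨l2.count k - l1.count k, by omega⟩
      rw [hd, List.replicate_add, List.append_assoc, depthCmpLoopB_strip]
      exact (depthCmpLoopB_lt k d t1 t2 (by omega) htlt1).symm
    · -- counts equal at k: strip and recurse
      have hstep : firstDiff (k :: ks) l1 l2 = firstDiff ks l1 l2 := by
        simp only [firstDiff, heq]
        simp
      rw [hstep, hdec1, hdec2, hct1, hct2, heq, depthCmpLoopB_strip]
      have hmemk : ∀ j ∈ ks, j ≠ k := fun j hj => ne_of_lt (hkgt j hj)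
      rw [← firstDiff_filter k ks l1 l2 hmemk]
      refine ih (l1.filter (fun x => decide (x ≠ k))) (l2.filter (fun x => decide (x ≠ k))) t1 t2 hks' ?_ ?_ ?_ ?_ ?_ ?_
      · intro x hx
        rw [List.mem_filter] at hx
        rcases List.mem_cons.mp (h1 x hx.1) with rfl | hmem
        · simp at hx
        · exact hmem
      · intro x hx
        rw [List.mem_filter] at hx
        rcases List.mem_cons.mp (h2 x hx.1) with rfl | hmem
        · simp at hx
        · exact hmem
      · exact hp1.filter _
      · exact List.Pairwise.filter _ hd1
      · exact hp2.filter _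
      · exact List.Pairwise.filter _ hd2
    · -- A returns 1 at key k
      have : firstDiff (k :: ks) l1 l2 = 1 := by
        simp only [firstDiff]
        rw [if_pos (by exact_mod_cast hgt)]
      rw [this, hdec1, hdec2, hct1, hct2]
      obtain ⟨d, hd⟩ : ∃ d, l1.count k = l2.count k + d := ⟨l1.count k - l2.count k, by omega⟩
      rw [hd, List.replicate_add, List.append_assoc, depthCmpLoopB_strip]
      exact (depthCmpLoopB_gt k d t1 t2 (by omega) htlt2).symm

-- Pairwise ≥ plus Nodup gives strict descent
theorem pairwise_gt_of_ge_nodup (l : List Int) (h1 : l.Pairwise (· ≥ ·)) (h2 : l.Nodup) :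
    l.Pairwise (· > ·) :=
  (h1.and h2).imp (fun h => lt_of_le_of_ne h.1 (Ne.symm h.2))

theorem depth_counts_cmp_eq (l1 l2 : List Int) :
    depth_counts_cmp (PySem.Dict.counter l1) (PySem.Dict.counter l2)
      = depthCmpLoopB (PySem.List.sorted l1 (fun x => x) true) (PySem.List.sorted l2 (fun x => x) true) := by
  unfold depth_counts_cmp
  rw [depthCmpLoopA_eq_firstDiff]
  set u := PySem.Set.union (PySem.Dict.counter l1).keys (PySem.Dict.counter l2).keys with hu
  have hnodup : u.Nodup := by
    rw [hu, PySem.Dict.keys_counter, PySem.Dict.keys_counter]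
    exact PySem.Set.nodup_union _ _ (PySem.Set.nodup_ofList _)
  set ks := PySem.List.sorted u (fun x => x) true with hks
  have hks_pair : ks.Pairwise (· > ·) :=
    pairwise_gt_of_ge_nodup ks (PySem.List.sorted_pairwise_rev u (fun x => x))
      ((PySem.List.sorted_perm u (fun x => x) true).nodup_iff.mpr hnodup)
  have hmem : ∀ (l : List Int), l = l1 ∨ l = l2 → ∀ x ∈ l, x ∈ ks := by
    intro l hl x hx
    rw [hks, PySem.List.mem_sorted, hu, PySem.Set.mem_union,
      PySem.Dict.keys_counter, PySem.Dict.keys_counter, PySem.Set.mem_ofList, PySem.Set.mem_ofList]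
    rcases hl with rfl | rfl
    · exact Or.inl hx
    · exact Or.inr hx
  exact firstDiff_eq_depthCmpLoopB ks l1 l2 _ _ hks_pair
    (hmem l1 (Or.inl rfl)) (hmem l2 (Or.inr rfl))
    (PySem.List.sorted_perm l1 (fun x => x) true) (PySem.List.sorted_pairwise_rev l1 (fun x => x))
    (PySem.List.sorted_perm l2 (fun x => x) true) (PySem.List.sorted_pairwise_rev l2 (fun x => x))

theorem aborted_same (r : Option (List (Option (List Int)))) : depthAbortedB r = depthAbortedA r := by
  cases r <;> rfl

-- ===== VERDICT (by name: the statement is the Claim_ definition above) =====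
theorem depth_cmp_spec : Claim_equal_depth_cmp := by
  intro r1 r2 _
  show depth_cmp r1 r2 = depth_cmp_alt r1 r2
  unfold depth_cmp depth_cmp_alt
  rw [aborted_same, aborted_same]
  by_cases h2 : depthAbortedA r2 = true
  · simp [h2]
  · by_cases h1 : depthAbortedA r1 = true
    · simp [h1, h2]
    · simp only [h1, h2, Bool.false_eq_true, if_false]
      exact depth_counts_cmp_eq _ _
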